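-- pv_equiv track=rewrite | github.com/craig3050/DrawingRenamer2024 | PDFTextCoordinates.py | search_and_filter
-- ===== SOURCE A (Python) =====
-- def search_and_filter(text_blocks, search_terms, x_threshold=30, y_threshold=30):
--     results = []
--
--     # Search for any of the terms
--     search_positions = []
--     for x, y, text in text_blocks:
--         for term in search_terms:
--             if term.lower() in text.lower():
--                 search_positions.append((x, y, text))
--                 break  # Stop checking other terms if one is found
--
--     # Find nearby text below or at the same level as the search term
--     for sx, sy, stext in search_positions:
--         nearby_texts = []
--         for x, y, text in text_blocks:
--             if (sx, sy, stext) != (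
--             x, y, text) and y >= sy:  # Ensure the text is below or at the same level as the search term
--                 dx = abs(sx - x)
--                 dy = abs(sy - y)
--                 if dx <= x_threshold and dy <= y_threshold:
--                     nearby_texts.append((x, y, text))
--         # Only add to results if there's at least one nearby text
--         if nearby_texts:
--             results.extend([(sx, sy, stext, x, y, text) for x, y, text in nearby_texts])
--
--     return results
-- ===== SOURCE B (Python) =====
-- def search_and_filter(text_blocks, search_terms, x_threshold=30, y_threshold=30):
--     lowered = [t.lower() for t in search_terms]
--     cw = x_threshold if x_threshold > 0 else 1
--     ch = y_threshold if y_threshold > 0 else 1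
--     grid = {}
--     for i, (x, y, text) in enumerate(text_blocks):
--         grid.setdefault((x // cw, y // ch), []).append(i)
--     results = []
--     for sx, sy, stext in text_blocks:
--         low = stext.lower()
--         if not any(t in low for t in lowered):
--             continue
--         scx, scy = sx // cw, sy // ch
--         cand = []
--         for ci in (scx - 1, scx, scx + 1):
--             for cj in (scy, scy + 1):
--                 cand.extend(grid.get((ci, cj), ()))
--         cand.sort()
--         for i in cand:
--             x, y, text = text_blocks[i]
--             if (sx, sy, stext) != (x, y, text) and y >= sy \
--                and abs(sx - x) <= x_threshold and abs(sy - y) <= y_threshold: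
--                 results.append((sx, sy, stext, x, y, text))
--     return results
-- ===== Notes on version B (the rewrite author's own statement) =====
-- stated objective: alternative
-- what changed: B lowercases the search terms once, buckets all blocks into a hash grid of threshold-sized cells keyed by (x//cell_w, y//cell_h), and for each matching block collects nearby blocks by querying only the 3x2 neighbouring cells and sorting the candidate indices to restore original order, where A rescans the whole block list for every match.
import Mathlib
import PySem

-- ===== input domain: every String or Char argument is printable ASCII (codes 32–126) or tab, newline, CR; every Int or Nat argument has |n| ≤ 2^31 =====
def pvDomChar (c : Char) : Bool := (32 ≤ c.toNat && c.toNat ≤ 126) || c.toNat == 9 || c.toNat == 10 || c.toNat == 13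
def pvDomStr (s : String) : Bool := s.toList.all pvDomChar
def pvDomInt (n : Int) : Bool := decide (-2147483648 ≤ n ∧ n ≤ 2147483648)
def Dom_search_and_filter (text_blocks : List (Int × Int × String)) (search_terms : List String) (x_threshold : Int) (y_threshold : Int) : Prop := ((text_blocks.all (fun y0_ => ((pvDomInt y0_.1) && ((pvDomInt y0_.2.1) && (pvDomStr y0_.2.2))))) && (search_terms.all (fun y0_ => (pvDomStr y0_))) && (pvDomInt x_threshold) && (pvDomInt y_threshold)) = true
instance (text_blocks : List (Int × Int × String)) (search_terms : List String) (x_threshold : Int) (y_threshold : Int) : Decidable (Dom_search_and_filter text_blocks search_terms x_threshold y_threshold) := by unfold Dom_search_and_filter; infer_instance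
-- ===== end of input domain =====

-- B buckets the blocks into a spatial hash grid keyed by threshold-sized cells and,
-- per matching block, queries only the 3x2 neighbouring cells (sorting the hits by
-- original index): an alternative algorithm with the same return value.


-- ===== PORT A =====
-- the inner 'for term in search_terms: ... break' loop of A
def pvMatchLoopA (text : String) (terms : List String) : Bool :=
  match terms with
  | [] => false
  | t :: rest =>
    if PySem.Str.isIn (PySem.Str.lower t) (PySem.Str.lower text) then true
    else pvMatchLoopA text rest

def search_and_filter (text_blocks : List (Int × Int × String)) (search_terms : List String) (x_threshold : Int) (y_threshold : Int) : List (Int × Int × String × Int × Int × String) :=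
  let search_positions :=
    text_blocks.foldl (fun sp b => if pvMatchLoopA b.2.2 search_terms then sp ++ [b] else sp)
      ([] : List (Int × Int × String))
  search_positions.foldl (fun results s =>
    let nearby := text_blocks.foldl (fun nb b =>
      if s ≠ b ∧ b.2.1 ≥ s.2.1 then
        if |s.1 - b.1| ≤ x_threshold ∧ |s.2.1 - b.2.1| ≤ y_threshold then nb ++ [b] else nb
      else nb) ([] : List (Int × Int × String))
    if nearby ≠ [] then
      results ++ nearby.map (fun b => (s.1, s.2.1, s.2.2, b.1, b.2.1, b.2.2))
    else results) []

-- ===== PORT B =====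
def search_and_filter_alt (text_blocks : List (Int × Int × String)) (search_terms : List String) (x_threshold : Int) (y_threshold : Int) : List (Int × Int × String × Int × Int × String) :=
  let lowered := search_terms.map PySem.Str.lower
  let cw := if x_threshold > 0 then x_threshold else 1
  let ch := if y_threshold > 0 then y_threshold else 1
  let grid := (PySem.List.enumerate text_blocks).foldl
      (fun g p => g.modify (PySem.Int.floordiv p.2.1 cw, PySem.Int.floordiv p.2.2.1 ch) [] (· ++ [p.1]))
      (PySem.Dict.empty : PySem.Dict (Int × Int) (List Int))
  text_blocks.foldl (fun results s =>
    if lowered.any (fun t => PySem.Str.isIn t (PySem.Str.lower s.2.2)) then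
      let scx := PySem.Int.floordiv s.1 cw
      let scy := PySem.Int.floordiv s.2.1 ch
      let cand := [scx - 1, scx, scx + 1].flatMap (fun ci =>
        [scy, scy + 1].flatMap (fun cj => grid.getD (ci, cj) []))
      let sortedCand := PySem.List.sorted cand (fun i => i) false
      results ++ sortedCand.foldl (fun r i =>
        let b := PySem.List.pyGetD text_blocks i (0, 0, "")
        if s ≠ b ∧ b.2.1 ≥ s.2.1 ∧ |s.1 - b.1| ≤ x_threshold ∧ |s.2.1 - b.2.1| ≤ y_threshold
        then r ++ [(s.1, s.2.1, s.2.2, b.1, b.2.1, b.2.2)] else r) []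
    else results) []

-- ===== PRECONDITION & SPEC =====
def Spec_search_and_filter (text_blocks : List (Int × Int × String)) (search_terms : List String) (x_threshold : Int) (y_threshold : Int) (out : List (Int × Int × String × Int × Int × String)) : Prop := out = search_and_filter_alt text_blocks search_terms x_threshold y_threshold
instance (text_blocks : List (Int × Int × String)) (search_terms : List String) (x_threshold : Int) (y_threshold : Int) (out : List (Int × Int × String × Int × Int × String)) : Decidable (Spec_search_and_filter text_blocks search_terms x_threshold y_threshold out) := by unfold Spec_search_and_filter; infer_instance

-- ===== CLAIM (what is proved, stated in full; the proofs are below) =====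
def Claim_equal_search_and_filter : Prop := ∀ (text_blocks : List (Int × Int × String)) (search_terms : List String) (x_threshold : Int) (y_threshold : Int), Dom_search_and_filter text_blocks search_terms x_threshold y_threshold → Spec_search_and_filter text_blocks search_terms x_threshold y_threshold (search_and_filter text_blocks search_terms x_threshold y_threshold)

-- ===== LEMMAS AND PROOFS =====

-- the nearby-filter condition both programs test (reducible so 'decide' infers its instance)
abbrev pvCond (xt yt : Int) (s b : Int × Int × String) : Prop :=
  s ≠ b ∧ b.2.1 ≥ s.2.1 ∧ |s.1 - b.1| ≤ xt ∧ |s.2.1 - b.2.1| ≤ yt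

def pvKey (cw ch : Int) (b : Int × Int × String) : Int × Int :=
  (PySem.Int.floordiv b.1 cw, PySem.Int.floordiv b.2.1 ch)

def pvKS (cw ch : Int) (s : Int × Int × String) : List (Int × Int) :=
  [(PySem.Int.floordiv s.1 cw - 1, PySem.Int.floordiv s.2.1 ch),
   (PySem.Int.floordiv s.1 cw - 1, PySem.Int.floordiv s.2.1 ch + 1),
   (PySem.Int.floordiv s.1 cw, PySem.Int.floordiv s.2.1 ch),
   (PySem.Int.floordiv s.1 cw, PySem.Int.floordiv s.2.1 ch + 1),
   (PySem.Int.floordiv s.1 cw + 1, PySem.Int.floordiv s.2.1 ch),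
   (PySem.Int.floordiv s.1 cw + 1, PySem.Int.floordiv s.2.1 ch + 1)]

lemma pvKS_nodup (cw ch : Int) (s : Int × Int × String) : (pvKS cw ch s).Nodup := by
  simp [pvKS, Prod.ext_iff]
  omega

lemma pv_fdiv_close (c a x : Int) (hc : 0 < c) (h : |x - a| ≤ c) :
    PySem.Int.floordiv x c - 1 ≤ PySem.Int.floordiv a c ∧
    PySem.Int.floordiv a c ≤ PySem.Int.floordiv x c + 1 := by
  rw [abs_le] at h
  rw [PySem.Int.floordiv_eq_ediv_of_pos hc, PySem.Int.floordiv_eq_ediv_of_pos hc]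
  have e1 : (x + (-1) * c) / c = x / c + (-1) := Int.add_mul_ediv_right x (-1) (ne_of_gt hc)
  have e2 : (x + 1 * c) / c = x / c + 1 := Int.add_mul_ediv_right x 1 (ne_of_gt hc)
  have l1 : (x + (-1) * c) / c ≤ a / c := Int.ediv_le_ediv hc (by omega)
  have l2 : a / c ≤ (x + 1 * c) / c := Int.ediv_le_ediv hc (by omega)
  omega

lemma pv_fdiv_between (c s y : Int) (hc : 0 < c) (h1 : s ≤ y) (h2 : y ≤ s + c) :
    PySem.Int.floordiv s c ≤ PySem.Int.floordiv y c ∧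
    PySem.Int.floordiv y c ≤ PySem.Int.floordiv s c + 1 := by
  rw [PySem.Int.floordiv_eq_ediv_of_pos hc, PySem.Int.floordiv_eq_ediv_of_pos hc]
  have e2 : (s + 1 * c) / c = s / c + 1 := Int.add_mul_ediv_right s 1 (ne_of_gt hc)
  have l1 : s / c ≤ y / c := Int.ediv_le_ediv hc h1
  have l2 : y / c ≤ (s + 1 * c) / c := Int.ediv_le_ediv hc (by omega)
  omega

lemma pvKey_mem (xt yt cw ch : Int) (hcw : cw = if xt > 0 then xt else 1)
    (hch : ch = if yt > 0 then yt else 1) (s b : Int × Int × String)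
    (h : pvCond xt yt s b) : pvKey cw ch b ∈ pvKS cw ch s := by
  obtain ⟨-, hy, hx, hyy⟩ := h
  have hcw1 : 0 < cw ∧ xt ≤ cw := by rw [hcw]; split <;> omega
  have hch1 : 0 < ch ∧ yt ≤ ch := by rw [hch]; split <;> omega
  have hX := pv_fdiv_close cw b.1 s.1 hcw1.1 (by rw [abs_le] at hx ⊢; omega)
  have hY := pv_fdiv_between ch s.2.1 b.2.1 hch1.1 hy (by rw [abs_le] at hyy; omega)
  simp [pvKS, pvKey, Prod.ext_iff]
  omega

lemma pv_filter_mem_cons_perm {κ β : Type} [BEq κ] [LawfulBEq κ] (k : κ) (ks : List κ)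
    (hk : k ∉ ks) (l : List (κ × β)) :
    (l.filter (fun q => q.1 == k || ks.contains q.1)).Perm
      (l.filter (fun q => q.1 == k) ++ l.filter (fun q => ks.contains q.1)) := by
  induction l with
  | nil => simp
  | cons x l ih =>
    by_cases hx : x.1 = k
    · have hx2 : x.1 ∉ ks := hx ▸ hk
      rw [List.filter_cons_of_pos (by simp [hx]), List.filter_cons_of_pos (by simp [hx]),
        List.filter_cons_of_neg (by simp [hx2])]
      exact ih.cons x
    · by_cases hx2 : x.1 ∈ ks
      · rw [List.filter_cons_of_pos (by simp [hx2]), List.filter_cons_of_neg (by simp [hx]),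
          List.filter_cons_of_pos (by simp [hx2])]
        exact (ih.cons x).trans List.perm_middle.symm
      · rw [List.filter_cons_of_neg (by simp [hx, hx2]), List.filter_cons_of_neg (by simp [hx]),
          List.filter_cons_of_neg (by simp [hx2])]
        exact ih

lemma pv_flatMap_filter_perm {κ β : Type} [BEq κ] [LawfulBEq κ] (ks : List κ) (hk : ks.Nodup)
    (l : List (κ × β)) :
    (ks.flatMap (fun k => l.filter (fun q => q.1 == k))).Perm
      (l.filter (fun q => ks.contains q.1)) := by
  induction ks with
  | nil => simp
  | cons k ks ih =>
    rw [List.flatMap_cons]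
    rw [List.nodup_cons] at hk
    have hpred : (fun (q : κ × β) => (k :: ks).contains q.1)
        = (fun q => q.1 == k || ks.contains q.1) := by
      funext q; simp [BEq.comm]
    rw [hpred]
    exact (List.Perm.append_left _ (ih hk.2)).trans
      (pv_filter_mem_cons_perm k ks hk.1 l).symm

def pvOut (s b : Int × Int × String) : Int × Int × String × Int × Int × String :=
  (s.1, s.2.1, s.2.2, b.1, b.2.1, b.2.2)

lemma pv_pyGetD_enum {tb : List (Int × Int × String)} {p : Int × (Int × Int × String)}
    (h : p ∈ PySem.List.enumerate tb) (d : Int × Int × String) :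
    PySem.List.pyGetD tb p.1 d = p.2 := by
  obtain ⟨k, hk, rfl⟩ := (PySem.List.mem_enumerate_iff tb 0 p).mp h
  simp [PySem.List.pyGetD_natCast, List.getD_eq_getElem?_getD, hk]

-- the grid's bucket contents
lemma pv_grid_getD (tb : List (Int × Int × String)) (cw ch : Int) (k : Int × Int) :
    ((PySem.List.enumerate tb).foldl
      (fun g p => g.modify (PySem.Int.floordiv p.2.1 cw, PySem.Int.floordiv p.2.2.1 ch) [] (· ++ [p.1]))
      (PySem.Dict.empty : PySem.Dict (Int × Int) (List Int))).getD k []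
    = (((PySem.List.enumerate tb).map (fun p => (pvKey cw ch p.2, p.1))).filter
        (fun q => q.1 == k)).map (fun q => q.2) := by
  rw [show ((PySem.List.enumerate tb).foldl
      (fun g p => g.modify (PySem.Int.floordiv p.2.1 cw, PySem.Int.floordiv p.2.2.1 ch) [] (· ++ [p.1]))
      (PySem.Dict.empty : PySem.Dict (Int × Int) (List Int)))
    = (((PySem.List.enumerate tb).map (fun p => (pvKey cw ch p.2, p.1))).foldl
        (fun d q => d.modify q.1 [] (· ++ [q.2])) PySem.Dict.empty) from by
      rw [List.foldl_map]; rfl]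
  rw [PySem.Dict.getD_foldl_modify_append]
  simp

lemma pv_B_query (tb : List (Int × Int × String)) (xt yt cw ch : Int)
    (hcw : cw = if xt > 0 then xt else 1) (hch : ch = if yt > 0 then yt else 1)
    (s : Int × Int × String) :
    (PySem.List.sorted
      ([PySem.Int.floordiv s.1 cw - 1, PySem.Int.floordiv s.1 cw, PySem.Int.floordiv s.1 cw + 1].flatMap (fun ci =>
        [PySem.Int.floordiv s.2.1 ch, PySem.Int.floordiv s.2.1 ch + 1].flatMap (fun cj =>
          ((PySem.List.enumerate tb).foldl
            (fun g p => g.modify (PySem.Int.floordiv p.2.1 cw, PySem.Int.floordiv p.2.2.1 ch) [] (· ++ [p.1]))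
            (PySem.Dict.empty : PySem.Dict (Int × Int) (List Int))).getD (ci, cj) [])))
      (fun i => i) false).foldl
      (fun r i =>
        if pvCond xt yt s (PySem.List.pyGetD tb i (0, 0, ""))
        then r ++ [pvOut s (PySem.List.pyGetD tb i (0, 0, ""))] else r) []
    = (tb.filter (fun b => decide (pvCond xt yt s b))).map (pvOut s) := by
  have hks := pvKS_nodup cw ch s
  -- candidate list = flatMap over the 6 keys
  have hcand : ([PySem.Int.floordiv s.1 cw - 1, PySem.Int.floordiv s.1 cw, PySem.Int.floordiv s.1 cw + 1].flatMap (fun ci =>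
        [PySem.Int.floordiv s.2.1 ch, PySem.Int.floordiv s.2.1 ch + 1].flatMap (fun cj =>
          ((PySem.List.enumerate tb).foldl
            (fun g p => g.modify (PySem.Int.floordiv p.2.1 cw, PySem.Int.floordiv p.2.2.1 ch) [] (· ++ [p.1]))
            (PySem.Dict.empty : PySem.Dict (Int × Int) (List Int))).getD (ci, cj) [])))
      = (pvKS cw ch s).flatMap (fun k =>
          (((PySem.List.enumerate tb).map (fun p => (pvKey cw ch p.2, p.1))).filter
            (fun q => q.1 == k)).map (fun q => q.2)) := by
    simp [pvKS, pv_grid_getD]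
  rw [hcand]
  -- sorted candidates = indices of blocks whose cell is among the 6 keys, in order
  have hsorted : PySem.List.sorted ((pvKS cw ch s).flatMap (fun k =>
          (((PySem.List.enumerate tb).map (fun p => (pvKey cw ch p.2, p.1))).filter
            (fun q => q.1 == k)).map (fun q => q.2))) (fun i => i) false
      = ((PySem.List.enumerate tb).filter
          (fun p => (pvKS cw ch s).contains (pvKey cw ch p.2))).map (fun p => p.1) := by
    apply PySem.List.sorted_id_eq_of_perm_of_pairwise
    · have h1 := (pv_flatMap_filter_perm (pvKS cw ch s) hks
        ((PySem.List.enumerate tb).map (fun p => (pvKey cw ch p.2, p.1)))).map (fun q => q.2)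
      rw [List.map_flatMap] at h1
      have h2 : List.map (fun q => q.2)
            (List.filter (fun q => (pvKS cw ch s).contains q.1)
              (List.map (fun p => (pvKey cw ch p.2, p.1)) (PySem.List.enumerate tb)))
          = List.map (fun p => p.1)
              (List.filter (fun p => (pvKS cw ch s).contains (pvKey cw ch p.2))
                (PySem.List.enumerate tb)) := by
        rw [List.filter_map, List.map_map]; rfl
      rw [← h2]
      exact h1.symm
    · have h2 : (((PySem.List.enumerate tb).filter
          (fun p => (pvKS cw ch s).contains (pvKey cw ch p.2))).map (fun p => p.1)).Pairwise
            (fun a b : Int => a < b) :=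
        List.Pairwise.map _ (fun a b h => h)
          ((PySem.List.pairwise_lt_enumerate tb 0).filter _)
      exact h2.imp le_of_lt
  rw [hsorted]
  rw [PySem.List.foldl_append_ite
    (p := fun i => pvCond xt yt s (PySem.List.pyGetD tb i (0, 0, "")))
    (f := fun i => pvOut s (PySem.List.pyGetD tb i (0, 0, "")))]
  rw [List.nil_append, List.filter_map, List.map_map]
  rw [List.filter_filter]
  -- collapse the cell-membership filter (implied by pvCond) and evaluate pyGetD on enumerate members
  rw [List.filter_congr (l := PySem.List.enumerate tb)
    (q := fun p => decide (pvCond xt yt s p.2))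
    (by intro p hp
        simp only [Function.comp]
        rw [pv_pyGetD_enum hp]
        by_cases hc : pvCond xt yt s p.2
        · simp [hc, pvKey_mem xt yt cw ch hcw hch s p.2 hc]
        · simp [hc])]
  rw [List.map_congr_left (l := (PySem.List.enumerate tb).filter (fun p => decide (pvCond xt yt s p.2)))
    (g := fun p => pvOut s p.2)
    (by intro p hp
        simp only [Function.comp]
        rw [pv_pyGetD_enum (List.mem_of_mem_filter hp)])]
  -- fold back to a filter over the blocks themselves
  conv_rhs => rw [← PySem.List.map_snd_enumerate tb 0, List.filter_map, List.map_map]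
  rfl

def pvSpecList (tb : List (Int × Int × String)) (terms : List String) (xt yt : Int) : List (Int × Int × String × Int × Int × String) :=
  (tb.filter (fun s => (terms.map PySem.Str.lower).any (fun t => PySem.Str.isIn t (PySem.Str.lower s.2.2)))).flatMap
    (fun s => (tb.filter (fun b => decide (pvCond xt yt s b))).map (pvOut s))

lemma pvMatchLoopA_eq_any (text : String) (terms : List String) :
    pvMatchLoopA text terms
      = (terms.map PySem.Str.lower).any (fun t => PySem.Str.isIn t (PySem.Str.lower text)) := by
  induction terms with
  | nil => rfl
  | cons t rest ih => simp [pvMatchLoopA, ih]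

lemma A_nearby (tb : List (Int × Int × String)) (xt yt : Int) (s : Int × Int × String) :
    tb.foldl (fun nb b =>
      if s ≠ b ∧ b.2.1 ≥ s.2.1 then
        if |s.1 - b.1| ≤ xt ∧ |s.2.1 - b.2.1| ≤ yt then nb ++ [b] else nb
      else nb) ([] : List (Int × Int × String))
    = tb.filter (fun b => decide (pvCond xt yt s b)) := by
  rw [PySem.List.foldl_congr_mem tb
    (fun nb b =>
      if s ≠ b ∧ b.2.1 ≥ s.2.1 then
        if |s.1 - b.1| ≤ xt ∧ |s.2.1 - b.2.1| ≤ yt then nb ++ [b] else nb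
      else nb)
    (fun nb b => if pvCond xt yt s b then nb ++ [b] else nb) []
    (by intro acc b _; by_cases h1 : s ≠ b ∧ b.2.1 ≥ s.2.1 <;>
        by_cases h2 : |s.1 - b.1| ≤ xt ∧ |s.2.1 - b.2.1| ≤ yt <;>
        simp [h1, h2, pvCond])]
  rw [PySem.List.foldl_append_ite_eq_filter]
  simp

lemma A_eq_spec (tb : List (Int × Int × String)) (terms : List String) (xt yt : Int) :
    search_and_filter tb terms xt yt = pvSpecList tb terms xt yt := by
  unfold search_and_filter
  simp only [A_nearby]
  rw [show (tb.foldl (fun sp b => if pvMatchLoopA b.2.2 terms then sp ++ [b] else sp) []) =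
        tb.filter (fun b => pvMatchLoopA b.2.2 terms) from by
      rw [PySem.List.foldl_append_if_eq_filter]; simp]
  rw [PySem.List.foldl_congr_mem (tb.filter (fun b => pvMatchLoopA b.2.2 terms))
    (fun results s =>
      if (tb.filter (fun b => decide (pvCond xt yt s b))) ≠ [] then
        results ++
          (tb.filter (fun b => decide (pvCond xt yt s b))).map
            (fun b => (s.1, s.2.1, s.2.2, b.1, b.2.1, b.2.2))
      else results)
    (fun results s => results ++
      (tb.filter (fun b => decide (pvCond xt yt s b))).map (fun b => (s.1, s.2.1, s.2.2, b.1, b.2.1, b.2.2))) []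
    (by intro acc s _
        by_cases h : (tb.filter (fun b => decide (pvCond xt yt s b))) = [] <;> simp only [h] <;> simp)]
  rw [PySem.List.foldl_append_eq_flatMap]
  unfold pvSpecList
  simp only [pvMatchLoopA_eq_any]
  unfold pvOut
  simp
lemma B_eq_spec (tb : List (Int × Int × String)) (terms : List String) (xt yt : Int) :
    search_and_filter_alt tb terms xt yt = pvSpecList tb terms xt yt := by
  unfold search_and_filter_alt
  rw [PySem.List.foldl_congr_mem tb _
    (fun results s =>
      if (terms.map PySem.Str.lower).any (fun t => PySem.Str.isIn t (PySem.Str.lower s.2.2)) then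
        results ++ (tb.filter (fun b => decide (pvCond xt yt s b))).map (pvOut s)
      else results) []
    (by intro acc s _
        beta_reduce
        by_cases hm : (terms.map PySem.Str.lower).any (fun t => PySem.Str.isIn t (PySem.Str.lower s.2.2))
        · rw [if_pos hm, if_pos hm]
          exact congrArg (fun z => acc ++ z)
            (pv_B_query tb xt yt (if xt > 0 then xt else 1) (if yt > 0 then yt else 1) rfl rfl s)
        · rw [if_neg hm, if_neg hm])]
  rw [PySem.List.foldl_if_eq_foldl_filter]
  rw [PySem.List.foldl_append_eq_flatMap]
  unfold pvSpecList
  simp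

-- ===== VERDICT (by name: the statement is the Claim_ definition above) =====
theorem search_and_filter_spec : Claim_equal_search_and_filter := by
  intro tb terms xt yt _
  unfold Spec_search_and_filter
  rw [A_eq_spec, B_eq_spec]
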